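-- pv_equiv track=rewrite | github.com/blegloannec/CodeProblems | Kattis/icons.py | icons
-- ===== SOURCE A (Python) =====
-- def icons(N,S):
--     Pref = S[:N]
--     for i in range(1,N):
--         Pref[i] += Pref[i-1]
--     Suff2 = S[:]
--     for i in range(2*N-3,-1,-1):
--         Suff2[i] += Suff2[i+2]
--     Suff2.append(0)
--     return min((S[0]+S[i])*(Pref[i-1]+Suff2[2*i]) for i in range(1,N+1))
-- ===== SOURCE B (Python) =====
-- def icons(N, S):
--     # Scan the N split points right to left with running prefix/suffix
--     # accumulators and a running minimum (no intermediate arrays).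
--     pref = sum(S[:N])
--     best = (S[0] + S[N]) * (pref + (S + [0])[2 * N])
--     suff = 0
--     for i in range(N - 1, 0, -1):
--         pref -= S[i]
--         suff += S[2 * i]
--         cur = (S[0] + S[i]) * (pref + suff)
--         if cur < best:
--             best = cur
--     return best
-- ===== Notes on version B (the rewrite author's own statement) =====
-- stated objective: alternative
-- what changed: Replaces A's two precomputed arrays (in-place prefix sums and step-2 suffix sums) plus a min over a generator by a single right-to-left scan with two running accumulators and a running minimum in O(1) extra space.
import Mathlib
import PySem

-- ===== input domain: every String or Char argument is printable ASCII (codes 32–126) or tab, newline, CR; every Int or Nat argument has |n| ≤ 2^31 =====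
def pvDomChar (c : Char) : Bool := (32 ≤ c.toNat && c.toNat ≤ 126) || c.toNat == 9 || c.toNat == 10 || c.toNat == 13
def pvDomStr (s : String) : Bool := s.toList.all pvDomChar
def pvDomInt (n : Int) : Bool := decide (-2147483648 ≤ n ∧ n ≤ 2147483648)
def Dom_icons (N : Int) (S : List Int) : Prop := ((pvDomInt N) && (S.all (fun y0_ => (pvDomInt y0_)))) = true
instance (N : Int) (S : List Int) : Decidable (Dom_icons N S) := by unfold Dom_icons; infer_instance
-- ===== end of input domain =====

-- B replaces A's two precomputed arrays (prefix sums, step-2 suffix sums) and the min over a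
-- generator by one right-to-left scan with two running accumulators and a running minimum
-- (same O(N) time, O(1) extra space); return values agree on all inputs A accepts.

-- ===== PORT A =====
def icons (N : Int) (S : List Int) : Int :=
  let Pref := (PySem.List.pyRange 1 N 1).foldl
      (fun P i => PySem.List.pySetD P i (PySem.List.pyGetD P i 0 + PySem.List.pyGetD P (i - 1) 0))
      (PySem.List.slice S none (some N))
  let Suff2 := ((PySem.List.pyRange (2 * N - 3) (-1) (-1)).foldl
      (fun Q i => PySem.List.pySetD Q i (PySem.List.pyGetD Q i 0 + PySem.List.pyGetD Q (i + 2) 0)) S) ++ [0]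
  (PySem.List.min?
      ((PySem.List.pyRange 1 (N + 1) 1).map
        (fun i => (PySem.List.pyGetD S 0 0 + PySem.List.pyGetD S i 0) *
                  (PySem.List.pyGetD Pref (i - 1) 0 + PySem.List.pyGetD Suff2 (2 * i) 0)))
      (fun x => x)).getD 0

-- ===== PORT B =====
def icons_alt (N : Int) (S : List Int) : Int :=
  let pref0 := (PySem.List.slice S none (some N)).sum
  let best0 := (PySem.List.pyGetD S 0 0 + PySem.List.pyGetD S N 0) *
      (pref0 + PySem.List.pyGetD (S ++ [0]) (2 * N) 0)
  let res := (PySem.List.pyRange (N - 1) 0 (-1)).foldl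
      (fun (st : Int × Int × Int) i =>
        let pref := st.2.1 - PySem.List.pyGetD S i 0
        let suff := st.2.2 + PySem.List.pyGetD S (2 * i) 0
        let cur := (PySem.List.pyGetD S 0 0 + PySem.List.pyGetD S i 0) * (pref + suff)
        (if cur < st.1 then cur else st.1, pref, suff))
      (best0, pref0, 0)
  res.1

-- ===== PRECONDITION & SPEC =====
-- Pre_ is exactly the inputs on which Python A returns (otherwise A raises IndexError on the
-- suffix loop / lookup, or ValueError on min of an empty generator).
def Pre_icons (N : Int) (S : List Int) : Prop := 1 ≤ N ∧ 2 * N ≤ (S.length : Int)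
instance (N : Int) (S : List Int) : Decidable (Pre_icons N S) := by unfold Pre_icons; infer_instance
def pvWitness_icons : Int × List Int := (2, [5, 3, 2, 4])

def Spec_icons (N : Int) (S : List Int) (out : Int) : Prop := out = icons_alt N S
instance (N : Int) (S : List Int) (out : Int) : Decidable (Spec_icons N S out) := by unfold Spec_icons; infer_instance

-- ===== CLAIM (what is proved, stated in full; the proofs are below) =====
def Claim_equal_icons : Prop := ∀ (N : Int) (S : List Int), Dom_icons N S → Pre_icons N S → Spec_icons N S (icons N S)


-- ===== LEMMAS AND PROOFS =====

-- Abbreviations (definitionally equal to the lambdas inside the ports) for the loop bodies.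
def pvFA : List Int → Int → List Int :=
  fun P i => PySem.List.pySetD P i (PySem.List.pyGetD P i 0 + PySem.List.pyGetD P (i - 1) 0)

def pvFS : List Int → Int → List Int :=
  fun Q i => PySem.List.pySetD Q i (PySem.List.pyGetD Q i 0 + PySem.List.pyGetD Q (i + 2) 0)

-- running-minimum step characterising Python's min over a generator
def pvOmin : Option Int → Int → Option Int :=
  fun b x => match b with
    | none => some x
    | some b => if x < b then some x else some b

-- B's loop body
def pvFB (S : List Int) : Int × Int × Int → Int → Int × Int × Int :=
  fun st i =>
    let pref := st.2.1 - PySem.List.pyGetD S i 0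
    let suff := st.2.2 + PySem.List.pyGetD S (2 * i) 0
    let cur := (PySem.List.pyGetD S 0 0 + PySem.List.pyGetD S i 0) * (pref + suff)
    (if cur < st.1 then cur else st.1, pref, suff)

-- sum of S[2i], S[2(i+1)], …, fuel many terms
def pvEsum (S : List Int) (i : Nat) : Nat → Int
  | 0 => 0
  | f + 1 => S.getD (2 * i) 0 + pvEsum S (i + 1) f

-- the i-th candidate value (1 ≤ i ≤ n), common to both programs
def pvCand (S : List Int) (n i : Nat) : Int :=
  (S.getD 0 0 + S.getD i 0) *
    ((S.take i).sum + (if i < n then pvEsum S i (n - i) else (S ++ [0]).getD (2 * n) 0))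

-- the common target: running minimum of the candidate values 1 … n (head-first order)
def pvTarget (S : List Int) (n : Nat) : Int :=
  ((List.range (n - 1)).map (fun k => pvCand S n (k + 2))).foldl min (pvCand S n 1)

lemma pvTakeSuccSum (S : List Int) (t : Nat) (ht : t < S.length) :
    (S.take (t + 1)).sum = (S.take t).sum + S.getD t 0 := by
  rw [List.getD_eq_getElem _ _ ht, List.sum_take_succ _ _ ht]

lemma pvAppendZeroGetD (R : List Int) (j : Nat) (hj : j < R.length) :
    (R ++ [0]).getD j 0 = R.getD j 0 := List.getD_append _ _ _ _ hj

lemma pvAppendZeroGetDLen (R : List Int) (j : Nat) (hj : j = R.length) :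
    (R ++ [0]).getD j 0 = 0 := by
  subst hj
  rw [List.getD_eq_getElem _ _ (by simp), List.getElem_append_right le_rfl]
  simp

lemma pvFoldOminSome (t : List Int) (a : Int) :
    t.foldl pvOmin (some a) = some (t.foldl min a) := by
  induction t generalizing a with
  | nil => rfl
  | cons x xs ih =>
      have h1 : pvOmin (some a) x = some (min a x) := by
        simp only [pvOmin]
        rcases lt_or_ge x a with h | h
        · rw [if_pos h, min_eq_right h.le]
        · rw [if_neg (not_lt.mpr h), min_eq_left h]
      rw [List.foldl_cons, h1, ih, List.foldl_cons]

lemma pvMinEqFoldOmin (l : List Int) :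
    PySem.List.min? l (fun x => x) = l.foldl pvOmin none := by
  cases l with
  | nil => rfl
  | cons x t =>
      rw [PySem.List.min?_id_cons]
      rw [List.foldl_cons]
      exact (pvFoldOminSome t x).symm

-- pulling a min out of the seed of a min-fold
lemma pvFoldlMinMin (l : List Int) : ∀ (a b : Int),
    l.foldl min (min a b) = min a (l.foldl min b) := by
  induction l with
  | nil => intro a b; rfl
  | cons x xs ih =>
      intro a b
      rw [List.foldl_cons, List.foldl_cons, min_assoc, ih]

-- the right-to-left running minimum equals the left-to-right one
lemma pvFoldBothEq (c : Nat → Int) (m : Nat) :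
    ((List.range m).map (fun k => c (m - k))).foldl min (c (m + 1))
      = ((List.range m).map (fun k => c (k + 2))).foldl min (c 1) := by
  induction m with
  | zero => rfl
  | succ m ih =>
      have hB : ((List.range (m + 1)).map (fun k => c (m + 1 - k))) =
          c (m + 1) :: ((List.range m).map (fun k => c (m - k))) := by
        rw [List.range_succ_eq_map, List.map_cons, List.map_map]
        refine congrArg (fun l => c (m + 1) :: l) (List.map_congr_left ?_)
        intro k _
        simp [Function.comp, Nat.succ_sub_succ]
      rw [hB, List.foldl_cons, pvFoldlMinMin, ih]
      rw [List.range_succ, List.map_append, List.foldl_append]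
      simp only [List.map_cons, List.map_nil, List.foldl_cons, List.foldl_nil]
      rw [min_comm]

lemma pvGetDSetD (R : List Int) (t j : Nat) (v : Int) (ht : t < R.length) :
    (PySem.List.pySetD R (t : Int) v).getD j 0 = if j = t then v else R.getD j 0 := by
  have h := PySem.List.pyGetD_pySetD_natCast R t j v 0 ht
  simpa using h

lemma pvPrefFold (t : Nat) (P : List Int) (hlen : t ≤ P.length) :
    (((PySem.List.pyRange 1 (t : Int) 1).foldl pvFA P).length = P.length)
    ∧ (∀ j : Nat, j < t → ((PySem.List.pyRange 1 (t : Int) 1).foldl pvFA P).getD j 0 = (P.take (j + 1)).sum)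
    ∧ (∀ j : Nat, t ≤ j → ((PySem.List.pyRange 1 (t : Int) 1).foldl pvFA P).getD j 0 = P.getD j 0) := by
  induction t with
  | zero =>
      rw [PySem.List.pyRange_one_eq_nil (by norm_num)]
      exact ⟨rfl, fun j hj => absurd hj (Nat.not_lt_zero j), fun j _ => rfl⟩
  | succ t ih =>
      rcases Nat.eq_zero_or_pos t with ht0 | ht1
      · subst ht0
        rw [show ((0 + 1 : Nat) : Int) = 1 by norm_num, PySem.List.pyRange_one_eq_nil le_rfl]
        refine ⟨rfl, fun j hj => ?_, fun j _ => rfl⟩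
        interval_cases j
        simp only [List.foldl_nil]
        cases P with
        | nil => simp at hlen
        | cons x xs => simp
      · obtain ⟨ihlen, ihlt, ihge⟩ := ih (Nat.le_of_succ_le hlen)
        have hsplit : PySem.List.pyRange 1 ((t + 1 : Nat) : Int) 1
            = PySem.List.pyRange 1 (t : Int) 1 ++ [(t : Int)] := by
          have h := PySem.List.pyRange_one_succ_right (a := 1) (b := (t : Int)) (by exact_mod_cast ht1)
          rw [← h]; norm_num
        rw [hsplit, List.foldl_append]
        set R := (PySem.List.pyRange 1 (t : Int) 1).foldl pvFA P with hR
        have htR : t < R.length := by omega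
        simp only [List.foldl_cons, List.foldl_nil]
        have he : ((t : Int) - 1) = ((t - 1 : Nat) : Int) := by omega
        have hv : pvFA R (t : Int) = PySem.List.pySetD R (t : Int) (R.getD t 0 + R.getD (t - 1) 0) := by
          simp [pvFA, he, List.getD]
        rw [hv]
        refine ⟨by rw [PySem.List.length_pySetD]; exact ihlen, fun j hj => ?_, fun j hj => ?_⟩
        · rw [pvGetDSetD R t j _ htR]
          rcases Nat.lt_or_ge j t with hjt | hjt
          · rw [if_neg (by omega)]
            exact ihlt j hjt
          · have hjt' : j = t := by omega
            rw [if_pos hjt', hjt', ihge t le_rfl, ihlt (t - 1) (by omega)]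
            have h1 : t - 1 + 1 = t := by omega
            rw [h1, pvTakeSuccSum P t (by omega), Int.add_comm]
        · rw [pvGetDSetD R t j _ htR, if_neg (by omega)]
          exact ihge j (by omega)

-- characterisation of A's second loop (in-place step-2 suffix recurrence, indices m-1 … 0)
lemma pvSuffFold (m : Nat) (Q : List Int) (hlen : m + 2 ≤ Q.length) :
    (((PySem.List.pyRange ((m : Int) - 1) (-1) (-1)).foldl pvFS Q).length = Q.length)
    ∧ (∀ j : Nat, m ≤ j → ((PySem.List.pyRange ((m : Int) - 1) (-1) (-1)).foldl pvFS Q).getD j 0 = Q.getD j 0)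
    ∧ (∀ j : Nat, j < m → ((PySem.List.pyRange ((m : Int) - 1) (-1) (-1)).foldl pvFS Q).getD j 0
        = Q.getD j 0 + ((PySem.List.pyRange ((m : Int) - 1) (-1) (-1)).foldl pvFS Q).getD (j + 2) 0) := by
  induction m generalizing Q with
  | zero =>
      rw [show ((0 : Nat) : Int) - 1 = -1 by norm_num, PySem.List.pyRange_neg_one_eq_nil le_rfl]
      exact ⟨rfl, fun j _ => rfl, fun j hj => absurd hj (Nat.not_lt_zero j)⟩
  | succ m ih =>
      have hcast : ((m + 1 : Nat) : Int) - 1 = (m : Int) := by push_cast; ring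
      rw [hcast, PySem.List.pyRange_neg_one_cons (by omega), List.foldl_cons]
      have hmQ : m < Q.length := by omega
      have he : ((m : Int) + 2) = ((m + 2 : Nat) : Int) := by push_cast; ring
      have hval : PySem.List.pyGetD Q ((m : Int) + 2) 0 = Q.getD (m + 2) 0 := by
        rw [he, PySem.List.pyGetD_natCast]
      have hQ' : pvFS Q (m : Int) = PySem.List.pySetD Q (m : Int) (Q.getD m 0 + Q.getD (m + 2) 0) := by
        simp only [pvFS]
        rw [hval]
        simp
      rw [hQ']
      set Q' := PySem.List.pySetD Q (m : Int) (Q.getD m 0 + Q.getD (m + 2) 0) with hQ'def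
      have hlenQ' : Q'.length = Q.length := PySem.List.length_pySetD Q _ _
      obtain ⟨ihlen, ihge, ihlt⟩ := ih Q' (by omega)
      have hget : ∀ j : Nat, Q'.getD j 0 = if j = m then Q.getD m 0 + Q.getD (m + 2) 0 else Q.getD j 0 :=
        fun j => pvGetDSetD Q m j _ hmQ
      refine ⟨by rw [ihlen, hlenQ'], fun j hj => ?_, fun j hj => ?_⟩
      · rw [ihge j (by omega), hget j, if_neg (by omega)]
      · rcases Nat.lt_or_ge j m with hjm | hjm
        · rw [ihlt j hjm, hget j, if_neg (by omega)]
        · have hjm' : j = m := by omega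
          rw [hjm', ihge m le_rfl, hget m, if_pos rfl,
              ihge (m + 2) (by omega), hget (m + 2), if_neg (by omega)]

-- the chain of the step-2 recurrence collapses to pvEsum
lemma pvSuffChain (S : List Int) (n : Nat) (hn : 1 ≤ n) (hL : 2 * n ≤ S.length) :
    ∀ (d i : Nat), i + d = n → 1 ≤ i → 1 ≤ d →
      ((PySem.List.pyRange (((2 * n - 2 : Nat) : Int) - 1) (-1) (-1)).foldl pvFS S).getD (2 * i) 0
        = pvEsum S i d := by
  obtain ⟨hlen, hge, hlt⟩ := pvSuffFold (2 * n - 2) S (by omega)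
  intro d
  induction d with
  | zero => intro i _ _ hd1; exact absurd hd1 (by omega)
  | succ d ih =>
      intro i hd hi1 _
      rcases Nat.eq_zero_or_pos d with h0 | h1
      · subst h0
        rw [hge (2 * i) (by omega)]
        simp [pvEsum]
      · rw [hlt (2 * i) (by omega), show 2 * i + 2 = 2 * (i + 1) by ring,
            ih (i + 1) (by omega) (by omega) h1]
        rfl

-- B's backward loop invariant
lemma pvBack (S : List Int) (n : Nat) (hn : 1 ≤ n) (hL : 2 * n ≤ S.length) :
    ∀ (i : Nat), i + 1 ≤ n → ∀ (b : Int),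
      (PySem.List.pyRange (i : Int) 0 (-1)).foldl (pvFB S)
          (b, (S.take (i + 1)).sum, pvEsum S (i + 1) (n - (i + 1)))
        = (((List.range i).map (fun k => pvCand S n (i - k))).foldl min b,
           (S.take 1).sum, pvEsum S 1 (n - 1)) := by
  intro i
  induction i with
  | zero =>
      intro _ b
      rw [PySem.List.pyRange_neg_one_eq_nil (by norm_num)]
      rfl
  | succ i ih =>
      intro hin b
      rw [PySem.List.pyRange_neg_one_cons (by exact_mod_cast Nat.succ_pos i), List.foldl_cons]
      have hgi : PySem.List.pyGetD S ((i + 1 : Nat) : Int) 0 = S.getD (i + 1) 0 :=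
        PySem.List.pyGetD_natCast S (i + 1) 0
      have hg2i : PySem.List.pyGetD S (2 * ((i + 1 : Nat) : Int)) 0 = S.getD (2 * (i + 1)) 0 := by
        rw [show (2 * ((i + 1 : Nat) : Int)) = ((2 * (i + 1) : Nat) : Int) by push_cast; ring,
            PySem.List.pyGetD_natCast]
      have hg0 : PySem.List.pyGetD S 0 0 = S.getD 0 0 := PySem.List.pyGetD_zero S 0
      simp only [pvFB, hgi, hg2i, hg0]
      have hpref : (S.take (i + 1 + 1)).sum - S.getD (i + 1) 0 = (S.take (i + 1)).sum := by
        rw [pvTakeSuccSum S (i + 1) (by omega)]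
        ring
      have hsuff : pvEsum S (i + 1 + 1) (n - (i + 1 + 1)) + S.getD (2 * (i + 1)) 0
          = pvEsum S (i + 1) (n - (i + 1)) := by
        rw [show n - (i + 1) = (n - (i + 2)) + 1 by omega]
        show _ = S.getD (2 * (i + 1)) 0 + pvEsum S (i + 2) (n - (i + 2))
        ring_nf
      rw [hpref, hsuff]
      have hcur : (S.getD 0 0 + S.getD (i + 1) 0) * ((S.take (i + 1)).sum + pvEsum S (i + 1) (n - (i + 1)))
          = pvCand S n (i + 1) := by
        rw [pvCand, if_pos (by omega : i + 1 < n)]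
      rw [hcur]
      have hmin : (if pvCand S n (i + 1) < b then pvCand S n (i + 1) else b) = min b (pvCand S n (i + 1)) := by
        rcases lt_or_ge (pvCand S n (i + 1)) b with h | h
        · rw [if_pos h, min_eq_right h.le]
        · rw [if_neg (not_lt.mpr h), min_eq_left h]
      rw [hmin, show (((i + 1 : Nat) : Int) - 1) = ((i : Nat) : Int) by push_cast; ring,
          ih (by omega) (min b (pvCand S n (i + 1)))]
      refine congrArg (fun x => (x, (S.take 1).sum, pvEsum S 1 (n - 1))) ?_
      rw [pvFoldlMinMin]
      rw [List.range_succ_eq_map, List.map_cons, List.map_map]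
      rw [List.foldl_cons]
      have hmin2 : min b (pvCand S n (i + 1 - 0)) = min b (pvCand S n (i + 1)) := rfl
      rw [hmin2]
      rw [pvFoldlMinMin]
      refine congrArg (fun l : List Int => min b (l.foldl min (pvCand S n (i + 1)))) ?_
      refine List.map_congr_left ?_
      intro k _
      simp [Function.comp, Nat.succ_sub_succ]

lemma pvAeq (N : Int) (S : List Int) (n : Nat) (hNn : N = (n : Int)) (hn : 1 ≤ n)
    (hL : 2 * n ≤ S.length) :
    icons N S = pvTarget S n := by
  subst hNn
  show (PySem.List.min?
      ((PySem.List.pyRange 1 ((n : Int) + 1) 1).map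
        (fun i => (PySem.List.pyGetD S 0 0 + PySem.List.pyGetD S i 0) *
          (PySem.List.pyGetD
              ((PySem.List.pyRange 1 (n : Int) 1).foldl pvFA (PySem.List.slice S none (some (n : Int)))) (i - 1) 0 +
           PySem.List.pyGetD
              (((PySem.List.pyRange (2 * (n : Int) - 3) (-1) (-1)).foldl pvFS S) ++ [0]) (2 * i) 0)))
      (fun x => x)).getD 0 = _
  have hslice : PySem.List.slice S none (some (n : Int)) = S.take n := by
    rw [PySem.List.slice_to S (by exact_mod_cast Nat.zero_le n), Int.toNat_natCast]
  have hstart : (2 * (n : Int) - 3) = ((2 * n - 2 : Nat) : Int) - 1 := by omega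
  rw [hslice, hstart]
  obtain ⟨hPlen, hPlt, hPge⟩ := pvPrefFold n (S.take n) (by rw [List.length_take]; omega)
  obtain ⟨hRlen, hRge, hRlt⟩ := pvSuffFold (2 * n - 2) S (by omega)
  rw [PySem.List.pyRange_one 1 ((n : Int) + 1), List.map_map,
      show ((n : Int) + 1 - 1) = (n : Int) by ring, Int.toNat_natCast]
  have hmap : ∀ k ∈ List.range n,
      ((fun i => (PySem.List.pyGetD S 0 0 + PySem.List.pyGetD S i 0) *
          (PySem.List.pyGetD
              ((PySem.List.pyRange 1 (n : Int) 1).foldl pvFA (S.take n)) (i - 1) 0 +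
           PySem.List.pyGetD
              (((PySem.List.pyRange (((2 * n - 2 : Nat) : Int) - 1) (-1) (-1)).foldl pvFS S) ++ [0]) (2 * i) 0))
        ∘ fun (j : Nat) => 1 + (j : Int)) k = (fun k => pvCand S n (k + 1)) k := by
    intro k hk
    rw [List.mem_range] at hk
    simp only [Function.comp_apply]
    have hg0 : PySem.List.pyGetD S 0 0 = S.getD 0 0 := PySem.List.pyGetD_zero S 0
    have h1 : (1 + (k : Int)) = ((k + 1 : Nat) : Int) := by push_cast; ring
    have h2 : (((k + 1 : Nat) : Int) - 1) = ((k : Nat) : Int) := by push_cast; ring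
    have h3 : (2 * ((k + 1 : Nat) : Int)) = ((2 * (k + 1) : Nat) : Int) := by push_cast; ring
    rw [hg0, h1, h2, h3, PySem.List.pyGetD_natCast, PySem.List.pyGetD_natCast,
        PySem.List.pyGetD_natCast,
        hPlt k hk, List.take_take, min_eq_left (by omega)]
    by_cases hk1 : k + 1 < n
    · rw [pvAppendZeroGetD _ _ (by rw [hRlen]; omega),
          pvSuffChain S n hn hL (n - (k + 1)) (k + 1) (by omega) (by omega) (by omega),
          pvCand, if_pos hk1]
    · have hkn : k + 1 = n := by omega
      have hA2n : (((PySem.List.pyRange (((2 * n - 2 : Nat) : Int) - 1) (-1) (-1)).foldl pvFS S)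
          ++ [0]).getD (2 * n) 0 = (S ++ [0]).getD (2 * n) 0 := by
        rcases Nat.lt_or_ge (2 * n) S.length with h | h
        · rw [pvAppendZeroGetD _ _ (by rw [hRlen]; omega), pvAppendZeroGetD _ _ h,
              hRge (2 * n) (by omega)]
        · have heq : 2 * n = S.length := by omega
          rw [pvAppendZeroGetDLen _ _ (by omega), pvAppendZeroGetDLen _ _ heq]
      rw [hkn, hA2n, pvCand, if_neg (lt_irrefl n)]
  rw [List.map_congr_left hmap, pvMinEqFoldOmin]
  obtain ⟨m, rfl⟩ : ∃ m, n = m + 1 := ⟨n - 1, by omega⟩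
  rw [List.range_succ_eq_map, List.map_cons, List.map_map, List.foldl_cons,
      show pvOmin none (pvCand S (m + 1) (0 + 1)) = some (pvCand S (m + 1) (0 + 1)) from rfl,
      pvFoldOminSome]
  rfl

lemma pvBeq (N : Int) (S : List Int) (n : Nat) (hNn : N = (n : Int)) (hn : 1 ≤ n)
    (hL : 2 * n ≤ S.length) :
    icons_alt N S = pvTarget S n := by
  subst hNn
  show ((PySem.List.pyRange ((n : Int) - 1) 0 (-1)).foldl (pvFB S)
      ((PySem.List.pyGetD S 0 0 + PySem.List.pyGetD S (n : Int) 0) *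
         ((PySem.List.slice S none (some (n : Int))).sum +
           PySem.List.pyGetD (S ++ [0]) (2 * (n : Int)) 0),
       (PySem.List.slice S none (some (n : Int))).sum, 0)).1 = _
  have hslice : PySem.List.slice S none (some (n : Int)) = S.take n := by
    rw [PySem.List.slice_to S (by exact_mod_cast Nat.zero_le n), Int.toNat_natCast]
  have hg0 : PySem.List.pyGetD S 0 0 = S.getD 0 0 := PySem.List.pyGetD_zero S 0
  have hgn : PySem.List.pyGetD S ((n : Nat) : Int) 0 = S.getD n 0 := PySem.List.pyGetD_natCast S n 0
  have hg2n : PySem.List.pyGetD (S ++ [0]) (2 * ((n : Nat) : Int)) 0 = (S ++ [0]).getD (2 * n) 0 := by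
    rw [show (2 * ((n : Nat) : Int)) = ((2 * n : Nat) : Int) by push_cast; ring,
        PySem.List.pyGetD_natCast]
  have hbest0 : (S.getD 0 0 + S.getD n 0) * ((S.take n).sum + (S ++ [0]).getD (2 * n) 0)
      = pvCand S n n := by
    rw [pvCand, if_neg (lt_irrefl n)]
  rw [hslice, hg0, hgn, hg2n, hbest0]
  have hinit : (PySem.List.pyRange ((n : Int) - 1) 0 (-1)).foldl (pvFB S)
      (pvCand S n n, (S.take n).sum, 0)
      = (PySem.List.pyRange (((n - 1 : Nat) : Int)) 0 (-1)).foldl (pvFB S)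
      (pvCand S n n, (S.take ((n - 1) + 1)).sum, pvEsum S ((n - 1) + 1) (n - ((n - 1) + 1))) := by
    rw [show ((n : Int) - 1) = ((n - 1 : Nat) : Int) by omega,
        show (n - 1) + 1 = n by omega, show n - n = 0 by omega]
    rfl
  rw [hinit, pvBack S n hn hL (n - 1) (by omega) (pvCand S n n)]
  show ((List.range (n - 1)).map (fun k => pvCand S n (n - 1 - k))).foldl min (pvCand S n n)
      = pvTarget S n
  obtain ⟨m, rfl⟩ : ∃ m, n = m + 1 := ⟨n - 1, by omega⟩
  exact pvFoldBothEq (fun k => pvCand S (m + 1) k) m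

-- ===== VERDICT (by name: the statement is the Claim_ definition above) =====
theorem icons_spec : Claim_equal_icons := by
  intro N S _hDom hPre
  obtain ⟨hN, hL⟩ := hPre
  have hNn : N = (N.toNat : Int) := (Int.toNat_of_nonneg (by omega)).symm
  have hn : 1 ≤ N.toNat := by omega
  have hLn : 2 * N.toNat ≤ S.length := by omega
  unfold Spec_icons
  rw [pvAeq N S N.toNat hNn hn hLn, pvBeq N S N.toNat hNn hn hLn]
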